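-- pv_equiv track=rewrite | github.com/pcyho/nonebot-plugins | random/random.py | _taowa
-- ===== SOURCE A (Python) =====
-- def _taowa(n):
--     a="套娃"
--     count=0
--     while True:
--         if count >n:
--             return
--         yield a
--         a="禁止"+ a
--         count=count+1
-- ===== SOURCE B (Python) =====
-- def _taowa(n):
--     # Each doll string is computed directly from its index: '禁止'*i + '套娃'.
--     for i in range(n + 1):
--         yield "禁止" * i + "套娃"
-- ===== Notes on version B (the rewrite author's own statement) =====
-- stated objective: simpler
-- what changed: B drops the mutable accumulator string and counter-with-break loop of A and instead computes each doll string independently from its index as '禁止'*i + '套娃' over range(n+1).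
import Mathlib
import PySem

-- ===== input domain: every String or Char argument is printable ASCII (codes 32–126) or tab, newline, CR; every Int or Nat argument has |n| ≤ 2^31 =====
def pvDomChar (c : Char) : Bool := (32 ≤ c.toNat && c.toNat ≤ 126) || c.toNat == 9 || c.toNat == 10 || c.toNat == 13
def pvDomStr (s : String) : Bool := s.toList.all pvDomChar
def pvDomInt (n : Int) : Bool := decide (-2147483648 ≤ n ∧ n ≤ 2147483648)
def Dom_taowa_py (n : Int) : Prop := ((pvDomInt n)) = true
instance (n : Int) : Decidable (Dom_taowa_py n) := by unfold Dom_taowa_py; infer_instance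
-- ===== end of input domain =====

-- B replaces A's mutable accumulator string and counter loop by computing each
-- doll string independently from its index ('禁止'*i + '套娃' over range(n+1)); objective: simpler.

-- ===== PORT A =====
-- A's while-True loop with counter `count` and accumulator `a`; the generator's
-- yielded values are collected in order into a list.
def taowaA_go (a : String) (count n : Int) : List String :=
  if count > n then []
  else a :: taowaA_go ("禁止" ++ a) (count + 1) n
termination_by (n + 1 - count).toNat
decreasing_by omega

def taowa_py (n : Int) : List String := taowaA_go "套娃" 0 n

-- ===== PORT B =====
-- '禁止' * k for a nonnegative repeat count (Python string repetition, ported by hand; exact for k ≥ 0)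
def pyStrRep (s : String) : Nat → String
  | 0 => ""
  | k + 1 => s ++ pyStrRep s k

def taowa_py_alt (n : Int) : List String :=
  (PySem.List.pyRange 0 (n + 1) 1).map (fun i => pyStrRep "禁止" i.toNat ++ "套娃")

-- ===== PRECONDITION & SPEC =====
def Spec_taowa_py (n : Int) (out : List String) : Prop := out = taowa_py_alt n
instance (n : Int) (out : List String) : Decidable (Spec_taowa_py n out) := by unfold Spec_taowa_py; infer_instance

-- ===== CLAIM (what is proved, stated in full; the proofs are below) =====
def Claim_equal_taowa_py : Prop := ∀ (n : Int), Dom_taowa_py n → Spec_taowa_py n (taowa_py n)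

-- ===== LEMMAS AND PROOFS =====

theorem pyStrRep_append_self (s : String) (k : Nat) :
    pyStrRep s k ++ s = s ++ pyStrRep s k := by
  induction k with
  | zero => simp [pyStrRep]
  | succ k ih => simp [pyStrRep, String.append_assoc, ih]

theorem taowaA_go_eq (m : Nat) : ∀ (a : String) (c n : Int), (n + 1 - c).toNat = m →
    taowaA_go a c n = (List.range m).map (fun k => pyStrRep "禁止" k ++ a) := by
  induction m with
  | zero =>
    intro a c n hm
    rw [taowaA_go]
    have : c > n := by omega
    simp [this]
  | succ m ih =>
    intro a c n hm
    rw [taowaA_go]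
    have hc : ¬ c > n := by omega
    simp only [hc, if_false]
    rw [ih ("禁止" ++ a) (c + 1) n (by omega), List.range_succ_eq_map]
    simp only [List.map_map, List.map_cons]
    refine congrArg₂ _ (by simp [pyStrRep]) (List.map_congr_left ?_)
    intro k _
    simp only [Function.comp, pyStrRep, ← String.append_assoc, pyStrRep_append_self]

theorem taowa_py_spec : Claim_equal_taowa_py := by
  intro n _
  unfold Spec_taowa_py taowa_py taowa_py_alt
  rw [taowaA_go_eq (n + 1 - 0).toNat "套娃" 0 n rfl, PySem.List.pyRange_one]
  simp

-- ===== VERDICT (by name: the statement is the Claim_ definition above) =====
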